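-- pv_equiv track=rewrite | github.com/willmorts/cryptopals | Set1/setonechallenges.py | re_order_grouped_list
-- ===== SOURCE A (Python) =====
-- def re_order_grouped_list(unicode_list):
--     ordered_str = ''
--     key_length = len(unicode_list)
--
--     for letter_index in range(0,len(unicode_list[0])):
--         for group_index in range(0,key_length):
--             if (len(unicode_list[group_index]) > letter_index):
--                 ordered_str += unicode_list[group_index][letter_index]
--
--     return ordered_str
-- ===== SOURCE B (Python) =====
-- def re_order_grouped_list(unicode_list):
--     # Single pass over the data, row by row, bucketing each character into its column;
--     # columns are truncated at len(unicode_list[0]) like the original.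
--     ncols = len(unicode_list[0])
--     columns = [[] for _ in range(ncols)]
--     for group in unicode_list:
--         for i, ch in enumerate(group):
--             if i < ncols:
--                 columns[i].append(ch)
--     return ''.join(''.join(col) for col in columns)
-- ===== Notes on version B (the rewrite author's own statement) =====
-- stated objective: alternative
-- what changed: Replaces A's column-major nested index scan (for each column index, rescan the whole list) with a single row-major pass that buckets each character into per-column accumulators and joins them at the end.
import Mathlib
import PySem

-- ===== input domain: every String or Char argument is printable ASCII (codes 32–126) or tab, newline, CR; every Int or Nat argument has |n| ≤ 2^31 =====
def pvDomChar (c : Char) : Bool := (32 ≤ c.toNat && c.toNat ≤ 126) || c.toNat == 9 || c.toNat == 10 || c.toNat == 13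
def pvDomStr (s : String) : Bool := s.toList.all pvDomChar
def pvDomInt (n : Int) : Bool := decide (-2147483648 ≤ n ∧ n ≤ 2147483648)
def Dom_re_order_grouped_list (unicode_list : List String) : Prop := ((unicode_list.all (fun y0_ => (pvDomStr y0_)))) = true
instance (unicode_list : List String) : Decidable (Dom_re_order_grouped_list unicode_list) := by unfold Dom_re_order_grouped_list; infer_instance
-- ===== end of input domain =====

-- B replaces A's column-major nested index scan by a single row-major pass that buckets
-- each character into per-column accumulators (an alternative decomposition, not faster).

-- ===== PORT A =====
-- literal port of A: for letter_index in range(len(ul[0])): for group_index in range(len(ul)):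
-- if len(ul[group_index]) > letter_index: ordered_str += ul[group_index][letter_index]
-- (Pre_ guarantees ul ≠ [], so the pyGetD defaults are never reached where Python would raise)
def re_order_grouped_list (unicode_list : List String) : String :=
  let key_length : Int := (unicode_list.length : Int)
  String.mk
    ((PySem.List.pyRange 0 ((PySem.List.pyGetD unicode_list 0 "").toList.length : Int) 1).foldl
      (fun ordered_str letter_index =>
        (PySem.List.pyRange 0 key_length 1).foldl
          (fun acc group_index =>
            if ((PySem.List.pyGetD unicode_list group_index "").toList.length : Int) > letter_index then
              acc ++ [PySem.List.pyGetD (PySem.List.pyGetD unicode_list group_index "").toList letter_index ' ']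
            else acc)
          ordered_str)
      [])

-- ===== PORT B =====
-- literal port of Source B: ncols = len(ul[0]); per-column accumulators filled in one pass over
-- the rows (enumerate over each group's characters, append into column i while i < ncols),
-- then ''.join(columns)
def re_order_grouped_list_alt (unicode_list : List String) : String :=
  let ncols : Nat := (PySem.List.pyGetD unicode_list 0 "").toList.length
  let columns : List (List Char) :=
    unicode_list.foldl
      (fun cols group =>
        (PySem.List.enumerate group.toList 0).foldl
          (fun cs p =>
            if p.1 < (ncols : Int) then
              cs.set p.1.toNat (cs.getD p.1.toNat [] ++ [p.2])
            else cs)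
          cols)
      (List.replicate ncols [])
  String.mk columns.flatten

-- ===== PRECONDITION & SPEC =====
-- Pre_ excludes only the empty list, on which Python A raises IndexError at unicode_list[0]
def Pre_re_order_grouped_list (unicode_list : List String) : Prop := unicode_list ≠ []
instance (unicode_list : List String) : Decidable (Pre_re_order_grouped_list unicode_list) := by unfold Pre_re_order_grouped_list; infer_instance
def pvWitness_re_order_grouped_list : List String := ["abc", "de", "fghi"]

def Spec_re_order_grouped_list (unicode_list : List String) (out : String) : Prop := out = re_order_grouped_list_alt unicode_list
instance (unicode_list : List String) (out : String) : Decidable (Spec_re_order_grouped_list unicode_list out) := by unfold Spec_re_order_grouped_list; infer_instance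

-- ===== CLAIM (what is proved, stated in full; the proofs are below) =====
def Claim_equal_re_order_grouped_list : Prop := ∀ (unicode_list : List String), Dom_re_order_grouped_list unicode_list → Pre_re_order_grouped_list unicode_list → Spec_re_order_grouped_list unicode_list (re_order_grouped_list unicode_list)

-- ===== LEMMAS AND PROOFS =====

-- column j of the transposition, in A's Int-indexed form
def pvColI (ul : List String) (j : Int) : List Char :=
  (ul.filter (fun g => decide ((g.toList.length : Int) > j))).map
    (fun g => PySem.List.pyGetD g.toList j ' ')

-- the same column, Nat-indexed (B's form)
def pvColN (ul : List String) (j : Nat) : List Char :=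
  (ul.filter (fun g => decide (j < g.toList.length))).map
    (fun g => g.toList.getD j ' ')

lemma pvColI_natCast (ul : List String) (k : Nat) : pvColI ul (k : Int) = pvColN ul k := by
  unfold pvColI pvColN
  have hf : ∀ g : String,
      (decide ((g.toList.length : Int) > (k : Int))) = decide (k < g.toList.length) := by
    intro g; simp
  rw [List.filter_congr (fun g _ => hf g)]
  exact List.map_congr_left (fun g _ => by simp)

-- A's inner loop over group indices is one column appended to the accumulator
lemma pvInnerA (ul : List String) (li : Int) (acc : List Char) :
    (PySem.List.pyRange 0 (ul.length : Int) 1).foldl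
      (fun acc group_index =>
        if ((PySem.List.pyGetD ul group_index "").toList.length : Int) > li then
          acc ++ [PySem.List.pyGetD (PySem.List.pyGetD ul group_index "").toList li ' ']
        else acc)
      acc
    = acc ++ pvColI ul li := by
  rw [PySem.List.foldl_pyRange_zero_pyGetD' ul ""
    (fun acc g => if ((g.toList.length : Int) > li) then
        acc ++ [PySem.List.pyGetD g.toList li ' '] else acc) acc]
  rw [PySem.List.foldl_append_ite (p := fun g : String => ((g.toList.length : Int) > li))
    (f := fun g : String => PySem.List.pyGetD g.toList li ' ')]
  rfl

lemma pvA_eq (ul : List String) :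
    re_order_grouped_list ul
      = String.mk ((List.range (PySem.List.pyGetD ul 0 "").toList.length).flatMap (pvColN ul)) := by
  simp only [re_order_grouped_list]
  simp only [pvInnerA]
  rw [PySem.List.foldl_append_eq_flatMap, List.nil_append, PySem.List.pyRange_zero_nat,
    List.flatMap_map]
  congr 1
  rw [List.flatMap_def, List.flatMap_def]
  congr 1
  exact List.map_congr_left (fun k _ => pvColI_natCast ul k)

-- B's inner loop on one group: pointwise effect on the columns
lemma pvStepB (n : Nat) (chars : List Char) : ∀ (s : Nat) (cs : List (List Char)), cs.length = n →
    (((PySem.List.enumerate chars (s : Int)).foldl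
        (fun cs (p : Int × Char) =>
          if p.1 < (n : Int) then cs.set p.1.toNat (cs.getD p.1.toNat [] ++ [p.2]) else cs)
        cs).length = n
     ∧ ∀ j : Nat,
        ((PySem.List.enumerate chars (s : Int)).foldl
          (fun cs (p : Int × Char) =>
            if p.1 < (n : Int) then cs.set p.1.toNat (cs.getD p.1.toNat [] ++ [p.2]) else cs)
          cs).getD j []
        = cs.getD j [] ++
            (if s ≤ j ∧ j < n ∧ j - s < chars.length then [chars.getD (j - s) ' '] else [])) := by
  induction chars with
  | nil =>
    intro s cs h
    simp [PySem.List.enumerate_nil, h]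
  | cons c rest ih =>
    intro s cs h
    rw [PySem.List.enumerate_cons]
    have hcast : (s : Int) + 1 = ((s + 1 : Nat) : Int) := by push_cast; ring
    simp only [List.foldl_cons, hcast]
    set cs' := (if (s : Int) < (n : Int) then
        cs.set (s : Int).toNat (cs.getD (s : Int).toNat [] ++ [c]) else cs) with hcs'
    have hlen' : cs'.length = n := by
      rw [hcs']; split_ifs <;> simp [h]
    obtain ⟨hl, hg⟩ := ih (s + 1) cs' hlen'
    refine ⟨hl, fun j => ?_⟩
    rw [hg j]
    have hget : cs'.getD j [] = cs.getD j [] ++ (if j = s ∧ s < n then [c] else []) := by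
      rw [hcs']
      by_cases hsn : s < n
      · have hsn' : ((s : Int)) < (n : Int) := by exact_mod_cast hsn
        rw [if_pos hsn']
        simp only [Int.toNat_natCast]
        by_cases hjs : j = s
        · subst hjs
          simp [List.getD_eq_getElem?_getD, h, hsn]
        · simp [List.getD_eq_getElem?_getD, Ne.symm hjs, hjs, hsn]
      · have hsn' : ¬ ((s : Int)) < (n : Int) := by exact_mod_cast hsn
        rw [if_neg hsn']
        simp [hsn]
    rw [hget]
    by_cases hjs : j = s
    · subst hjs
      by_cases hjn : j < n
      · simp [hjn]
      · simp [hjn]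
    · rcases Nat.lt_trichotomy j s with hlt | heq | hgt
      · have h1 : ¬ (s + 1 ≤ j) := by omega
        have h2 : ¬ (s ≤ j ∧ j < n ∧ j - s < (c :: rest).length) := by
          intro hc; omega
        have h3 : ¬ (j = s ∧ s < n) := by intro hc; omega
        rw [if_neg h3, List.append_nil, if_neg (fun hc => h1 hc.1), if_neg h2, List.append_nil]
      · exact absurd heq hjs
      · have h3 : ¬ (j = s ∧ s < n) := by intro hc; omega
        rw [if_neg h3, List.append_nil]
        by_cases hjn : j < n
        · by_cases hbl : j - (s + 1) < rest.length
          · have hc1 : s + 1 ≤ j ∧ j < n ∧ j - (s + 1) < rest.length := ⟨by omega, hjn, hbl⟩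
            have hlenc : j - s < (c :: rest).length := by
              simp only [List.length_cons]; omega
            have hc2 : s ≤ j ∧ j < n ∧ j - s < (c :: rest).length := ⟨by omega, hjn, hlenc⟩
            rw [if_pos hc1, if_pos hc2]
            have h4 : j - s = (j - (s + 1)) + 1 := by omega
            rw [h4]
            simp
          · have hc1 : ¬ (s + 1 ≤ j ∧ j < n ∧ j - (s + 1) < rest.length) := by
              intro hc; exact hbl hc.2.2
            have hc2 : ¬ (s ≤ j ∧ j < n ∧ j - s < (c :: rest).length) := by
              simp only [List.length_cons]; omega
            rw [if_neg hc1, if_neg hc2, List.append_nil]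
        · have hc1 : ¬ (s + 1 ≤ j ∧ j < n ∧ j - (s + 1) < rest.length) := by
            intro hc; exact hjn hc.2.1
          have hc2 : ¬ (s ≤ j ∧ j < n ∧ j - s < (c :: rest).length) := by
            intro hc; exact hjn hc.2.1
          rw [if_neg hc1, if_neg hc2, List.append_nil]

-- B's outer loop over the rows: every column accumulates its pvColN
lemma pvFoldB (n : Nat) (ul : List String) : ∀ (cs : List (List Char)), cs.length = n →
    ((ul.foldl
        (fun cols group =>
          (PySem.List.enumerate group.toList 0).foldl
            (fun cs (p : Int × Char) =>
              if p.1 < (n : Int) then cs.set p.1.toNat (cs.getD p.1.toNat [] ++ [p.2]) else cs)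
            cols)
        cs).length = n
     ∧ ∀ j : Nat,
        (ul.foldl
          (fun cols group =>
            (PySem.List.enumerate group.toList 0).foldl
              (fun cs (p : Int × Char) =>
                if p.1 < (n : Int) then cs.set p.1.toNat (cs.getD p.1.toNat [] ++ [p.2]) else cs)
              cols)
          cs).getD j []
        = cs.getD j [] ++ (if j < n then pvColN ul j else [])) := by
  induction ul with
  | nil =>
    intro cs h
    refine ⟨h, fun j => ?_⟩
    simp [pvColN]
  | cons g rest ih =>
    intro cs h
    obtain ⟨hl1, hg1⟩ := pvStepB n g.toList 0 cs h
    simp only [Nat.cast_zero, Nat.zero_le, true_and, Nat.sub_zero] at hl1 hg1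
    simp only [List.foldl_cons]
    obtain ⟨hl2, hg2⟩ := ih _ hl1
    refine ⟨hl2, fun j => ?_⟩
    rw [hg2 j, hg1 j]
    have hcol : pvColN (g :: rest) j
        = (if j < g.toList.length then [g.toList.getD j ' '] else []) ++ pvColN rest j := by
      unfold pvColN
      rw [List.filter_cons]
      by_cases hj : j < g.toList.length
      · rw [if_pos hj, if_pos (by simpa using hj), List.map_cons]
        rfl
      · rw [if_neg hj, if_neg (by simpa using hj), List.nil_append]
    by_cases hjn : j < n
    · rw [if_pos hjn, if_pos hjn, hcol, List.append_assoc]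
      congr 1
      congr 1
      by_cases hjg : j < g.toList.length
      · rw [if_pos ⟨hjn, hjg⟩, if_pos hjg]
      · rw [if_neg (fun hc => hjg hc.2), if_neg hjg]
    · rw [if_neg hjn, if_neg hjn, List.append_nil, List.append_nil,
        if_neg (fun hc : j < n ∧ j < g.toList.length => hjn hc.1), List.append_nil]

lemma pvB_eq (ul : List String) :
    re_order_grouped_list_alt ul
      = String.mk ((List.range (PySem.List.pyGetD ul 0 "").toList.length).flatMap (pvColN ul)) := by
  simp only [re_order_grouped_list_alt]
  set n := (PySem.List.pyGetD ul 0 "").toList.length with hn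
  obtain ⟨hl, hg⟩ := pvFoldB n ul (List.replicate n []) (by simp)
  congr 1
  rw [List.flatMap_def]
  congr 1
  apply List.ext_getElem
  · rw [hl]; simp
  · intro j h1 h2
    have hjn : j < n := hl ▸ h1
    have h' := hg j
    rw [List.getD_eq_getElem?_getD, List.getElem?_eq_getElem h1] at h'
    simp only [Option.getD_some] at h'
    rw [h']
    simp [hjn]

-- ===== VERDICT (by name: the statement is the Claim_ definition above) =====
theorem re_order_grouped_list_spec : Claim_equal_re_order_grouped_list := by
  intro ul _ _
  unfold Spec_re_order_grouped_list
  rw [pvA_eq, pvB_eq]
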